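-- pv_equiv track=rewrite | github.com/Leovaldez42/HackerRank | ProblemSolving/Beautiful Days at the movies.py | beautifulDays
-- ===== SOURCE A (Python) =====
-- def beautifulDays(i, j, k):
--     counter=0
--     for a in range(i,j+1):
--         x=str(a)
--         test=x[::-1]
--         y=int(test)
--         z=abs(a-y)
--         if(z%k==0):
--             counter+=1
--     return counter
-- ===== SOURCE B (Python) =====
-- def beautifulDays(i, j, k):
--     counter = 0
--     for a in range(i, j + 1):
--         n = a
--         rev = 0
--         while n > 0:
--             rev = rev * 10 + n % 10
--             n //= 10
--         if abs(a - rev) % k == 0: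
--             counter += 1
--     return counter
-- ===== Notes on version B (the rewrite author's own statement) =====
-- stated objective: alternative
-- what changed: The digit reversal int(str(a)[::-1]) is replaced by a purely arithmetic reversal (rev = rev*10 + n%10; n //= 10), so B never builds, slices or parses a string.
import Mathlib
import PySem

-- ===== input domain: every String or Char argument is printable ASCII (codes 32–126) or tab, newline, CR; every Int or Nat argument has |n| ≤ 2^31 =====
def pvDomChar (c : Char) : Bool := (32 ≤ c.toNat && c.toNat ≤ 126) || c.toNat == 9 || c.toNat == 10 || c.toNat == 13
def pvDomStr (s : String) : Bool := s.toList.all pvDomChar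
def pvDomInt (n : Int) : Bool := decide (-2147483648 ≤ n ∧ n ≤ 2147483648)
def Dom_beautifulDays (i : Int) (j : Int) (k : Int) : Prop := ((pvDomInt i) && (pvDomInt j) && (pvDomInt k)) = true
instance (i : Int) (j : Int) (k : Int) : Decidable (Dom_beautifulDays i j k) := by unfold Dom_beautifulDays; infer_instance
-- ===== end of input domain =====

-- B replaces the per-element string reversal int(str(a)[::-1]) by a purely arithmetic digit-reversal
-- loop (rev = rev*10 + n%10; n //= 10): an alternative algorithm of the same cost, no string building.

-- ===== PORT A =====
-- int(test): ported by hand as a base-10 all-digits parser (none = ValueError). Under Pre_ the string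
-- fed to it is always str(a)[::-1] for a ≥ 0, i.e. a nonempty string of ASCII digits, on which this is
-- exactly Python's int(). (PySem.Int.ofStr?'s digit loop is a private definition with no lemmas about
-- its value, so this one call is ported by hand; it is exact on every string this program produces.)
def pyIntDigits? (s : String) : Option Int :=
  let cs := s.toList
  if cs ≠ [] ∧ cs.all Char.isDigit then
    some (cs.foldl (fun acc c => acc * 10 + ((c.toNat : Int) - 48)) 0)
  else none

def beautifulDays (i : Int) (j : Int) (k : Int) : Int :=
  (PySem.List.pyRange i (j + 1) 1).foldl
    (fun counter a =>
      let x := PySem.Int.toStr a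
      let test := (PySem.Str.slice? x none none (-1)).getD ""   -- x[::-1] (always some)
      let y := (pyIntDigits? test).getD 0                        -- int(test); none (ValueError) excluded by Pre_
      let z := |a - y|
      if PySem.Int.mod z k = 0 then counter + 1 else counter) 0

-- ===== PORT B =====
def revLoop (n : Int) (rev : Int) : Int :=
  if 0 < n then revLoop (PySem.Int.floordiv n 10) (rev * 10 + PySem.Int.mod n 10) else rev
termination_by n.toNat
decreasing_by
  have h10 : PySem.Int.floordiv n 10 = n / 10 := PySem.Int.floordiv_eq_ediv_of_pos (by omega)
  rw [h10]
  omega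

def beautifulDays_alt (i : Int) (j : Int) (k : Int) : Int :=
  (PySem.List.pyRange i (j + 1) 1).foldl
    (fun counter a =>
      let rev := revLoop a 0
      if PySem.Int.mod (|a - rev|) k = 0 then counter + 1 else counter) 0

-- ===== PRECONDITION & SPEC =====
-- Pre_ excludes exactly the inputs on which Python A raises: a nonempty range starting below 0
-- (str(a) has a '-', so int of its reversal → ValueError) and a nonempty range with k = 0
-- (z % 0 → ZeroDivisionError). On every other input A returns.
def Pre_beautifulDays (i : Int) (j : Int) (k : Int) : Prop := i ≤ j → (0 ≤ i ∧ k ≠ 0)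
instance (i : Int) (j : Int) (k : Int) : Decidable (Pre_beautifulDays i j k) := by unfold Pre_beautifulDays; infer_instance
def pvWitness_beautifulDays : Int × Int × Int := (20, 23, 6)

def Spec_beautifulDays (i : Int) (j : Int) (k : Int) (out : Int) : Prop := out = beautifulDays_alt i j k
instance (i : Int) (j : Int) (k : Int) (out : Int) : Decidable (Spec_beautifulDays i j k out) := by unfold Spec_beautifulDays; infer_instance

-- ===== CLAIM (what is proved, stated in full; the proofs are below) =====
def Claim_equal_beautifulDays : Prop := ∀ (i : Int) (j : Int) (k : Int), Dom_beautifulDays i j k → Pre_beautifulDays i j k → Spec_beautifulDays i j k (beautifulDays i j k)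

-- ===== LEMMAS AND PROOFS =====

-- Nat.toDigitsCore: the accumulator is an append
theorem toDigitsCore_acc (f : Nat) : ∀ (n : Nat) (ds : List Char),
    Nat.toDigitsCore 10 f n ds = Nat.toDigitsCore 10 f n [] ++ ds := by
  induction f with
  | zero => intro n ds; simp [Nat.toDigitsCore]
  | succ f ih =>
    intro n ds
    simp only [Nat.toDigitsCore]
    by_cases h : n / 10 = 0
    · simp [h]
    · simp only [h]
      rw [ih (n / 10) (Nat.digitChar (n % 10) :: ds), ih (n / 10) [Nat.digitChar (n % 10)]]
      simp

-- Nat.toDigitsCore: fuel irrelevance (the recursion is on n/10 < n, any fuel > n suffices)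
theorem toDigitsCore_fuel : ∀ (n f f' : Nat) (ds : List Char), n < f → n < f' →
    Nat.toDigitsCore 10 f n ds = Nat.toDigitsCore 10 f' n ds := by
  intro n
  induction n using Nat.strong_induction_on with
  | _ n ih =>
    intro f f' ds hf hf'
    match f, f' with
    | f + 1, f' + 1 =>
      simp only [Nat.toDigitsCore]
      by_cases h : n / 10 = 0
      · simp [h]
      · simp only [h]
        exact ih (n / 10) (Nat.div_lt_self (by omega) (by omega)) f f' _ (by omega) (by omega)

theorem toDigits_lt (m : Nat) (h : m < 10) : Nat.toDigits 10 m = [Nat.digitChar m] := by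
  simp only [Nat.toDigits, Nat.toDigitsCore]
  have : m / 10 = 0 := Nat.div_eq_of_lt h
  simp [this, Nat.mod_eq_of_lt h]

theorem toDigits_ge (m : Nat) (h : 10 ≤ m) :
    Nat.toDigits 10 m = Nat.toDigits 10 (m / 10) ++ [Nat.digitChar (m % 10)] := by
  have hne : m / 10 ≠ 0 := by
    have := Nat.div_le_div_right (c := 10) h; omega
  calc Nat.toDigits 10 m = Nat.toDigitsCore 10 (m + 1) m [] := rfl
    _ = Nat.toDigitsCore 10 m (m / 10) [Nat.digitChar (m % 10)] := by
        simp only [Nat.toDigitsCore]; simp [hne]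
    _ = Nat.toDigitsCore 10 m (m / 10) [] ++ [Nat.digitChar (m % 10)] := toDigitsCore_acc _ _ _
    _ = Nat.toDigitsCore 10 (m / 10 + 1) (m / 10) [] ++ [Nat.digitChar (m % 10)] := by
        rw [toDigitsCore_fuel (m / 10) m (m / 10 + 1) []
          (by have := Nat.div_lt_self (by omega : 0 < m) (by omega : 1 < 10); omega) (by omega)]
    _ = Nat.toDigits 10 (m / 10) ++ [Nat.digitChar (m % 10)] := rfl

theorem digitChar_isDigit (d : Nat) (h : d < 10) : (Nat.digitChar d).isDigit = true := by
  interval_cases d <;> decide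

theorem digitChar_toNat (d : Nat) (h : d < 10) : ((Nat.digitChar d).toNat : Int) - 48 = (d : Int) := by
  interval_cases d <;> decide

theorem toDigits_ne_nil (m : Nat) : Nat.toDigits 10 m ≠ [] := by
  by_cases h : m < 10
  · rw [toDigits_lt m h]; simp
  · rw [toDigits_ge m (by omega)]; simp

theorem toDigits_all_digit (m : Nat) : (Nat.toDigits 10 m).all Char.isDigit = true := by
  induction m using Nat.strong_induction_on with
  | _ m ih =>
    by_cases h : m < 10
    · rw [toDigits_lt m h]; simp [digitChar_isDigit m h]
    · rw [toDigits_ge m (by omega)]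
      simp only [List.all_append, Bool.and_eq_true, List.all_cons, List.all_nil, Bool.and_true]
      exact ⟨ih (m / 10) (Nat.div_lt_self (by omega) (by omega)),
        digitChar_isDigit _ (Nat.mod_lt _ (by omega))⟩

theorem revLoop_pos (n rev : Int) (h : 0 < n) :
    revLoop n rev = revLoop (PySem.Int.floordiv n 10) (rev * 10 + PySem.Int.mod n 10) := by
  rw [revLoop]; simp [h]

theorem revLoop_nonpos (n rev : Int) (h : ¬ 0 < n) : revLoop n rev = rev := by
  rw [revLoop]; simp [h]

-- the characters of str(m), reversed and folded as base-10 digits, compute B's arithmetic reversal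
theorem fold_reverse_toDigits (m : Nat) (hm : 1 ≤ m) : ∀ (r : Int),
    ((Nat.toDigits 10 m).reverse).foldl (fun acc c => acc * 10 + ((c.toNat : Int) - 48)) r
      = revLoop (m : Int) r := by
  induction m using Nat.strong_induction_on with
  | _ m ih =>
    intro r
    have hfd : PySem.Int.floordiv (m : Int) 10 = ((m / 10 : Nat) : Int) := by
      simpa using PySem.Int.floordiv_natCast m 10
    have hmd : PySem.Int.mod (m : Int) 10 = ((m % 10 : Nat) : Int) := by
      simpa using PySem.Int.mod_natCast m 10
    by_cases h : m < 10
    · rw [toDigits_lt m h]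
      simp only [List.reverse_cons, List.reverse_nil, List.nil_append, List.foldl_cons, List.foldl_nil]
      rw [digitChar_toNat m h]
      rw [revLoop_pos _ _ (by exact_mod_cast hm), hfd, hmd]
      have h0 : m / 10 = 0 := Nat.div_eq_of_lt h
      have hmm : m % 10 = m := Nat.mod_eq_of_lt h
      rw [h0, hmm, revLoop_nonpos _ _ (by simp)]
    · rw [toDigits_ge m (by omega)]
      simp only [List.reverse_append, List.reverse_cons, List.reverse_nil, List.nil_append,
        List.singleton_append, List.foldl_cons]
      rw [digitChar_toNat _ (Nat.mod_lt _ (by omega))]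
      rw [ih (m / 10) (Nat.div_lt_self (by omega) (by omega)) (by
        have := Nat.div_le_div_right (c := 10) (by omega : 10 ≤ m); omega)
        (r * 10 + ((m % 10 : Nat) : Int))]
      conv_rhs => rw [revLoop_pos _ _ (show (0:Int) < (m:Int) by exact_mod_cast hm)]
      rw [hfd, hmd]

-- per-element agreement: for 0 ≤ a, A's int(str(a)[::-1]) equals B's revLoop a 0
theorem parse_reverse_eq_revLoop (a : Int) (ha : 0 ≤ a) :
    (pyIntDigits? (String.ofList (PySem.Int.toStr a).toList.reverse)).getD 0 = revLoop a 0 := by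
  have hchars : (PySem.Int.toStr a).toList = Nat.toDigits 10 a.toNat := by
    rw [PySem.Int.toList_toStr]
    simp [PySem.Int.toChars, not_lt.mpr ha]
  rw [hchars]
  simp only [pyIntDigits?, String.toList_ofList]
  rw [if_pos ⟨by simp [toDigits_ne_nil a.toNat],
    by simp only [List.all_reverse]; exact toDigits_all_digit a.toNat⟩]
  simp only [Option.getD_some]
  by_cases h0 : a.toNat = 0
  · have ha0 : a = 0 := by omega
    subst ha0
    simp only [Int.toNat_zero] at *
    rw [revLoop_nonpos 0 0 (by omega)]
    decide
  · rw [fold_reverse_toDigits a.toNat (by omega) 0]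
    congr 1
    omega

-- ===== VERDICT (by name: the statement is the Claim_ definition above) =====
theorem beautifulDays_spec : Claim_equal_beautifulDays := by
  intro i j k _ hpre
  unfold Spec_beautifulDays beautifulDays beautifulDays_alt
  apply PySem.List.foldl_congr_mem
  intro acc x hx
  have hmem := (PySem.List.mem_pyRange_one).mp hx
  have hx0 : 0 ≤ x := by have := hpre (by omega); omega
  simp only [PySem.Str.slice?_none_none_neg_one, Option.getD_some]
  rw [parse_reverse_eq_revLoop x hx0]
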